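-- pv_equiv track=rewrite | github.com/Salma-El-Alaoui/Kernel-Methods | src/sift/BagOfFeatures.py | _words_pred_per_img
-- ===== SOURCE A (Python) =====
-- def _words_pred_per_img(words_pred,n_ft_per_img):
--     count_words = []
--     begin = 0
--     for i_n_features in range(len(n_ft_per_img)):
--         n_features = n_ft_per_img[i_n_features]
--         count_words.append(words_pred[begin:begin+n_features])
--         begin += n_features
--     return count_words
-- ===== SOURCE B (Python) =====
-- def _words_pred_per_img(words_pred, n_ft_per_img):
--     bounds = [0]
--     for n in n_ft_per_img:
--         bounds.append(bounds[-1] + n)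
--     return [words_pred[a:b] for a, b in zip(bounds, bounds[1:])]
-- ===== Notes on version B (the rewrite author's own statement) =====
-- stated objective: alternative
-- what changed: B precomputes all chunk boundaries as a prefix-sum table and then builds the result by slicing over consecutive boundary pairs, instead of threading a running begin offset through a single index loop that appends slices as it goes.
import Mathlib
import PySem

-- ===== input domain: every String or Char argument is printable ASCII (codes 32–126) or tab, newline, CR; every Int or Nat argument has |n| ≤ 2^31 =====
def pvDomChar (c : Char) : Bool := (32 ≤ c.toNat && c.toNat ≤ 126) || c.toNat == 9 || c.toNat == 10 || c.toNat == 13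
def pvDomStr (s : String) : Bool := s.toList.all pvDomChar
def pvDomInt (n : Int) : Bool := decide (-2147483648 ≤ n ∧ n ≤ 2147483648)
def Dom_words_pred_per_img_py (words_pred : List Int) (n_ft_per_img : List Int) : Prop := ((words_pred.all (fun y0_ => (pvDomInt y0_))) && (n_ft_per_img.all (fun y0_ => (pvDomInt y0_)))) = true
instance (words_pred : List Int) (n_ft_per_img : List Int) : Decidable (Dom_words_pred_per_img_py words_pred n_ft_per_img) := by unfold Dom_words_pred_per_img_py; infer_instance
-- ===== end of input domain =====

-- B replaces A's single running-offset loop by a precomputed prefix-sum boundary table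
-- followed by a slice over consecutive boundary pairs (objective: alternative decomposition).

-- ===== PORT A =====
-- for i in range(len(n_ft_per_img)): n = n_ft_per_img[i]; acc.append(words_pred[begin:begin+n]); begin += n
def words_pred_per_img_py (words_pred : List Int) (n_ft_per_img : List Int) : List (List Int) :=
  ((PySem.List.pyRange 0 (n_ft_per_img.length : Int) 1).foldl
    (fun (st : List (List Int) × Int) i =>
      let n := PySem.List.pyGetD n_ft_per_img i 0
      (st.1 ++ [PySem.List.slice words_pred (some st.2) (some (st.2 + n))], st.2 + n))
    ([], 0)).1

-- ===== PORT B =====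
-- bounds = [0]; for n in ns: bounds.append(bounds[-1] + n)
def pvBoundsB (n_ft_per_img : List Int) : List Int :=
  n_ft_per_img.foldl (fun bs n => bs ++ [PySem.List.pyGetD bs (-1) 0 + n]) [0]

-- [words_pred[a:b] for a, b in zip(bounds, bounds[1:])]
def words_pred_per_img_py_alt (words_pred : List Int) (n_ft_per_img : List Int) : List (List Int) :=
  let bounds := pvBoundsB n_ft_per_img
  (bounds.zip (PySem.List.slice bounds (some 1) none)).map
    (fun ab => PySem.List.slice words_pred (some ab.1) (some ab.2))

-- ===== PRECONDITION & SPEC =====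
def Spec_words_pred_per_img_py (words_pred : List Int) (n_ft_per_img : List Int) (out : List (List Int)) : Prop := out = words_pred_per_img_py_alt words_pred n_ft_per_img
instance (words_pred : List Int) (n_ft_per_img : List Int) (out : List (List Int)) : Decidable (Spec_words_pred_per_img_py words_pred n_ft_per_img out) := by unfold Spec_words_pred_per_img_py; infer_instance

-- ===== CLAIM (what is proved, stated in full; the proofs are below) =====
def Claim_equal_words_pred_per_img_py : Prop := ∀ (words_pred : List Int) (n_ft_per_img : List Int), Dom_words_pred_per_img_py words_pred n_ft_per_img → Spec_words_pred_per_img_py words_pred n_ft_per_img (words_pred_per_img_py words_pred n_ft_per_img)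

-- ===== LEMMAS AND PROOFS =====

/-- Reference chunk list: the slices both programs produce, starting at offset `b`. -/
def pvChunks (wp : List Int) (b : Int) : List Int → List (List Int)
  | [] => []
  | n :: t => PySem.List.slice wp (some b) (some (b + n)) :: pvChunks wp (b + n) t

/-- Boundaries after `b`, i.e. the running prefix sums starting from `b`. -/
def pvBoundsFrom (b : Int) : List Int → List Int
  | [] => []
  | n :: t => (b + n) :: pvBoundsFrom (b + n) t

theorem pvA_foldl (wp : List Int) (ns : List Int) (acc : List (List Int)) (b : Int) :
    (ns.foldl
      (fun (st : List (List Int) × Int) n =>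
        (st.1 ++ [PySem.List.slice wp (some st.2) (some (st.2 + n))], st.2 + n))
      (acc, b)).1 = acc ++ pvChunks wp b ns := by
  induction ns generalizing acc b with
  | nil => simp [pvChunks]
  | cons n t ih => simp [List.foldl_cons, ih, pvChunks]

theorem pvB_bounds (ns : List Int) (pre : List Int) (b : Int) :
    ns.foldl (fun bs n => bs ++ [PySem.List.pyGetD bs (-1) 0 + n]) (pre ++ [b])
      = pre ++ b :: pvBoundsFrom b ns := by
  induction ns generalizing pre b with
  | nil => simp [pvBoundsFrom]
  | cons n t ih =>
    simp only [List.foldl_cons, PySem.List.pyGetD_neg_one_append_singleton]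
    have := ih (pre ++ [b]) (b + n)
    simpa [pvBoundsFrom] using this

theorem pvZip_chunks (wp : List Int) (ns : List Int) (b : Int) :
    ((b :: pvBoundsFrom b ns).zip (pvBoundsFrom b ns)).map
        (fun ab => PySem.List.slice wp (some ab.1) (some ab.2))
      = pvChunks wp b ns := by
  induction ns generalizing b with
  | nil => simp [pvBoundsFrom, pvChunks]
  | cons n t ih => simp [pvBoundsFrom, pvChunks, ih]

-- ===== VERDICT (by name: the statement is the Claim_ definition above) =====
theorem words_pred_per_img_py_spec : Claim_equal_words_pred_per_img_py := by
  intro wp ns _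
  show words_pred_per_img_py wp ns = words_pred_per_img_py_alt wp ns
  unfold words_pred_per_img_py words_pred_per_img_py_alt pvBoundsB
  rw [PySem.List.foldl_pyRange_zero_pyGetD' ns 0
    (fun (st : List (List Int) × Int) n =>
      (st.1 ++ [PySem.List.slice wp (some st.2) (some (st.2 + n))], st.2 + n)) ([], 0)]
  rw [pvA_foldl wp ns [] 0]
  have hb : ([0] : List Int) = [] ++ [0] := rfl
  rw [hb, pvB_bounds ns [] 0]
  simp only [List.nil_append, PySem.List.slice_from_one, List.tail_cons]
  rw [pvZip_chunks]
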